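-- pv_equiv track=rewrite | github.com/trbocode/robots | Markov/MatrixTest.py | AddInd
-- ===== SOURCE A (Python) =====
-- n=50
--
-- dim=2
--
-- def AddInd(Indicies,Ind,num):
--     tmp=0
--     for i in range(dim-1,-1,-1):
--         tmp*=n
--         if(i==Ind):
--             tmp+=(Indicies[i]+num)%n
--         else:
--             tmp+=(Indicies[i])
--     return(int(tmp))
-- ===== SOURCE B (Python) =====
-- n = 50
-- dim = 2
--
-- def AddInd(Indicies, Ind, num):
--     # stage 1: materialize the digit vector and wrap only the Ind digit
--     digits = [Indicies[i] for i in range(dim)]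
--     if 0 <= Ind < dim:
--         digits[Ind] = (digits[Ind] + num) % n
--     # stage 2: encode by explicit place values (little-endian weights n**i)
--     return int(sum(d * n**i for i, d in enumerate(digits)))
-- ===== Notes on version B (the rewrite author's own statement) =====
-- stated objective: alternative
-- what changed: Replaces the fused Horner accumulation loop with two stages: first build the digit vector and wrap only the Ind digit in place, then encode it with explicit place-value weights n**i via sum over enumerate.
import Mathlib
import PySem

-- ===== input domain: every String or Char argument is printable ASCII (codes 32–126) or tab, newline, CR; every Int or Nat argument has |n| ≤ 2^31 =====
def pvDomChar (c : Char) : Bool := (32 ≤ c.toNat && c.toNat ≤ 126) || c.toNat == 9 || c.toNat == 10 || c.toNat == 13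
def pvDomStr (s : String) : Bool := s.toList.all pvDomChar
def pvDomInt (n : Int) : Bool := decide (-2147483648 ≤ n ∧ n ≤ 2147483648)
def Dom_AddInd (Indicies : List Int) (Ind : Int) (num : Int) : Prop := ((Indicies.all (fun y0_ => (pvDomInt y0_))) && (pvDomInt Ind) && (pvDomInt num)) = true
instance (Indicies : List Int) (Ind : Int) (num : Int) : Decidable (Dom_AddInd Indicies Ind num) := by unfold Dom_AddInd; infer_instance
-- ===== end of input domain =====

-- B replaces A's fused Horner loop with two stages — build the digit vector and wrap only the
-- Ind digit in place, then encode it with explicit place-value weights n^i (alternative decomposition).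

-- ===== PORT A =====
-- literal transliteration of A's Horner loop over range(dim-1, -1, -1), dim=2, n=50
def AddInd (Indicies : List Int) (Ind : Int) (num : Int) : Int :=
  (PySem.List.pyRange (2 - 1) (-1) (-1)).foldl (fun tmp i =>
    let tmp := tmp * 50
    if i = Ind then tmp + PySem.Int.mod (PySem.List.pyGetD Indicies i 0 + num) 50
    else tmp + PySem.List.pyGetD Indicies i 0) 0

-- ===== PORT B =====
-- literal transliteration of Source B: stage 1 builds and patches the digit vector,
-- stage 2 sums d * 50^i over enumerate(digits)
def AddInd_alt (Indicies : List Int) (Ind : Int) (num : Int) : Int :=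
  let digits := (PySem.List.pyRange 0 2 1).map (fun i => PySem.List.pyGetD Indicies i 0)
  let digits := if 0 ≤ Ind ∧ Ind < 2 then
      digits.set Ind.toNat (PySem.Int.mod (PySem.List.pyGetD digits Ind 0 + num) 50)
    else digits
  ((PySem.List.enumerate digits).map (fun p => p.2 * 50 ^ p.1.toNat)).foldl (· + ·) 0

-- ===== PRECONDITION & SPEC =====
-- Pre_: A raises IndexError (it reads Indicies[1] and Indicies[0]) when the list has fewer than 2 elements.
def Pre_AddInd (Indicies : List Int) (Ind : Int) (num : Int) : Prop := 2 ≤ Indicies.length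
instance (Indicies : List Int) (Ind : Int) (num : Int) : Decidable (Pre_AddInd Indicies Ind num) := by unfold Pre_AddInd; infer_instance
def pvWitness_AddInd : List Int × Int × Int := ([3, 7], 1, 5)

def Spec_AddInd (Indicies : List Int) (Ind : Int) (num : Int) (out : Int) : Prop := out = AddInd_alt Indicies Ind num
instance (Indicies : List Int) (Ind : Int) (num : Int) (out : Int) : Decidable (Spec_AddInd Indicies Ind num out) := by unfold Spec_AddInd; infer_instance

-- ===== CLAIM (what is proved, stated in full; the proofs are below) =====
def Claim_equal_AddInd : Prop := ∀ (Indicies : List Int) (Ind : Int) (num : Int), Dom_AddInd Indicies Ind num → Pre_AddInd Indicies Ind num → Spec_AddInd Indicies Ind num (AddInd Indicies Ind num)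

-- ===== LEMMAS AND PROOFS =====
theorem pyRangeA_eval : PySem.List.pyRange (2 - 1) (-1) (-1) = [1, 0] := by decide
theorem pyRangeB_eval : PySem.List.pyRange 0 2 1 = [0, 1] := by decide

theorem getD_one_cons (a b : Int) (rest : List Int) : PySem.List.pyGetD (a :: b :: rest) 1 0 = b := by
  simp [PySem.List.pyGetD, PySem.List.pyGet?, PySem.List.pyIdx?]

theorem main_eq (a b : Int) (rest : List Int) (Ind num : Int) :
    AddInd (a :: b :: rest) Ind num = AddInd_alt (a :: b :: rest) Ind num := by
  unfold AddInd AddInd_alt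
  rw [pyRangeA_eval, pyRangeB_eval]
  by_cases h0 : Ind = 0
  · subst h0
    simp [List.foldl, List.map, PySem.List.enumerate_cons, PySem.List.enumerate_nil,
      PySem.List.pyGetD_zero_cons, getD_one_cons]
    ring
  · by_cases h1 : Ind = 1
    · subst h1
      simp [List.foldl, List.map, PySem.List.enumerate_cons, PySem.List.enumerate_nil,
        PySem.List.pyGetD_zero_cons, getD_one_cons]
      ring
    · have hc : ¬ (0 ≤ Ind ∧ Ind ≤ 1) := by omega
      have h0' : ¬ ((0 : Int) = Ind) := fun h => h0 h.symm
      have h1' : ¬ ((1 : Int) = Ind) := fun h => h1 h.symm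
      simp [List.foldl, List.map, PySem.List.enumerate_cons, PySem.List.enumerate_nil,
        PySem.List.pyGetD_zero_cons, getD_one_cons, h0', h1', hc]
      ring

-- ===== VERDICT (by name: the statement is the Claim_ definition above) =====
theorem AddInd_spec : Claim_equal_AddInd := by
  intro Indicies Ind num _ hpre
  obtain ⟨a, b, rest, rfl⟩ : ∃ a b rest, Indicies = a :: b :: rest := by
    match Indicies, hpre with
    | a :: b :: rest, _ => exact ⟨a, b, rest, rfl⟩
  exact main_eq a b rest Ind num
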